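-- pv_equiv track=rewrite | github.com/the9000/h-number-runs | number-runs.py | findNumberRuns
-- ===== SOURCE A (Python) =====
-- import itertools
--
-- def findNumberRuns(input_sequence, run_length=3):
--     """Find ascending or descending number runs in a sequence.
--
--     Args:
--       input_sequence: a sequence of integers.
--       run_length: length of runs to detect; must be > 1.
--     Returns:
--       List of indices where runs begin in data.
--     """
--     assert run_length > 1, "Runs shorter that 2 make no sense."
--     source = iter(input_sequence)  # ok with any iterables
--     index = 0
--     while True:
--         potential_run, rest = take(run_length, source)
--         if len(potential_run) < run_length:
--             break
--         if isRun(potential_run):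
--             yield index
--         # scan further right after the beginning of the previos potential_run.
--         source = itertools.chain(potential_run[1:], rest)
--         index += 1
--
-- def isRun(potential_run):
--     """Returns True iff potential_run is an ascending or descending run."""
--     # We allocate O(len(potential_run)) memory. If runs are huge,
--     # this can be rewritten using index access or iterators to avoid it.
--     diffs = (x - y for (x, y) in zip(potential_run, potential_run[1:]))
--     delta = next(diffs)
--     if delta not in (-1, 1):
--         return False
--     return all(next_delta == delta for next_delta in diffs)
--
-- def take(n, data):
--     """Returns:
--       up to n first elements of data, and an iterator with the rest of data."""
--     source = iter(data)
--     # The list comprehension advances source as a side effect. So impure.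
--     return ([x for (_, x) in zip(range(n), source)], source)
-- ===== SOURCE B (Python) =====
-- def findNumberRuns(input_sequence, run_length=3):
--     """One-pass streak scan over consecutive differences (O(n), no window re-checks)."""
--     assert run_length > 1, "Runs shorter that 2 make no sense."
--     prev = None
--     prevd = None
--     streak = 0
--     i = 0
--     for x in input_sequence:
--         if prev is not None:
--             d = x - prev
--             if d in (-1, 1) and (streak == 0 or d == prevd):
--                 streak += 1
--             elif d in (-1, 1):
--                 streak = 1
--             else:
--                 streak = 0
--             prevd = d
--             if streak >= run_length - 1:
--                 yield i - (run_length - 1)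
--         prev = x
--         i += 1
-- ===== Notes on version B (the rewrite author's own statement) =====
-- stated objective: faster
-- what changed: Replaced the sliding-window re-check (isRun on every length-run_length window, via iterator take/chain juggling) with a single pass over consecutive differences that keeps a running streak of equal +-1 diffs and emits a start index whenever the streak reaches run_length-1.
import Mathlib
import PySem

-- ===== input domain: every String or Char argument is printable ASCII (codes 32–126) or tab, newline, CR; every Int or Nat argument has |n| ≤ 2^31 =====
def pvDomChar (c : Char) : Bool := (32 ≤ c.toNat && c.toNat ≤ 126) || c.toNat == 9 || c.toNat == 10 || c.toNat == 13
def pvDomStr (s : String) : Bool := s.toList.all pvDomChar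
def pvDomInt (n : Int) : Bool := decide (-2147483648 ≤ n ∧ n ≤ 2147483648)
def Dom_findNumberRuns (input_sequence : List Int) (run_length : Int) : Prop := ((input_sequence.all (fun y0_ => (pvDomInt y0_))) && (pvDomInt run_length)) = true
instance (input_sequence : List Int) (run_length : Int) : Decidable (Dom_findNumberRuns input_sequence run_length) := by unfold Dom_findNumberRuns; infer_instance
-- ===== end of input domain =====

-- B replaces A's per-index window re-check (O(n·run_length)) by a single pass that keeps a
-- running streak of equal ±1 consecutive differences; equivalence of return values is proved
-- for run_length ≥ 2 (A's assert raises otherwise).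

-- ===== PORT A =====
-- isRun: diffs = (x - y for x,y in zip(w, w[1:])); first delta must be ±1, rest equal to it.
def isRun_A (w : List Int) : Bool :=
  match List.zipWith (fun x y => x - y) w w.tail with
  | [] => false  -- next(diffs) would raise; unreachable: windows have length run_length ≥ 2
  | delta :: ds => if delta = -1 ∨ delta = 1 then ds.all (fun d => d == delta) else false

-- the while-loop: take run_length elements, test, then continue on window[1:] ++ rest.
-- (hL is only a totality device for Lean's termination checker; the Python loop terminates
-- for the same reason once the assert has ensured run_length > 1.)
def goA (L : Nat) (hL : 1 ≤ L) (source : List Int) (index : Int) : List Int :=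
  if h : (source.take L).length < L then []
  else
    (if isRun_A (source.take L) then [index] else []) ++
      goA L hL ((source.take L).drop 1 ++ source.drop L) (index + 1)
termination_by source.length
decreasing_by
  simp only [List.length_take, List.length_append, List.length_drop] at *
  omega

def findNumberRuns (input_sequence : List Int) (run_length : Int) : List Int :=
  if h : run_length ≤ 1 then []  -- Python: assert run_length > 1 raises here (excluded by Pre_)
  else goA run_length.toNat (by omega) input_sequence 0

-- ===== PORT B =====
-- one fold step of Source B's loop; state = (prev, prevd, streak, i, out)
def stepB (run_length : Int) (st : Option Int × Option Int × Int × Int × List Int) (x : Int) :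
    Option Int × Option Int × Int × Int × List Int :=
  match st with
  | (prev?, prevd?, streak, i, out) =>
    match prev? with
    | none => (some x, prevd?, streak, i + 1, out)
    | some prev =>
      let d := x - prev
      let streak' : Int :=
        if (d = -1 ∨ d = 1) ∧ (streak = 0 ∨ prevd? = some d) then streak + 1
        else if d = -1 ∨ d = 1 then 1 else 0
      let out' := if run_length - 1 ≤ streak' then out ++ [i - (run_length - 1)] else out
      (some x, some d, streak', i + 1, out')

def findNumberRuns_alt (input_sequence : List Int) (run_length : Int) : List Int :=
  if run_length ≤ 1 then []  -- Python: assert run_length > 1 raises here (excluded by Pre_)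
  else (input_sequence.foldl (stepB run_length) (none, none, 0, 0, [])).2.2.2.2

-- ===== PRECONDITION & SPEC =====
-- Pre_ excludes exactly run_length ≤ 1, where Python A's `assert run_length > 1` raises
-- AssertionError (on first iteration of the generator).
def Pre_findNumberRuns (input_sequence : List Int) (run_length : Int) : Prop := 2 ≤ run_length
instance (input_sequence : List Int) (run_length : Int) : Decidable (Pre_findNumberRuns input_sequence run_length) := by unfold Pre_findNumberRuns; infer_instance

def pvWitness_findNumberRuns : List Int × Int := ([1, 2, 3, 2], 3)

def Spec_findNumberRuns (input_sequence : List Int) (run_length : Int) (out : List Int) : Prop := out = findNumberRuns_alt input_sequence run_length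
instance (input_sequence : List Int) (run_length : Int) (out : List Int) : Decidable (Spec_findNumberRuns input_sequence run_length out) := by unfold Spec_findNumberRuns; infer_instance

-- ===== CLAIM (what is proved, stated in full; the proofs are below) =====
def Claim_equal_findNumberRuns : Prop := ∀ (input_sequence : List Int) (run_length : Int), Dom_findNumberRuns input_sequence run_length → Pre_findNumberRuns input_sequence run_length → Spec_findNumberRuns input_sequence run_length (findNumberRuns input_sequence run_length)

-- ===== LEMMAS AND PROOFS =====

-- window predicate and the common specification both ports are reduced to
def winP (L : Nat) (q : List Int) (j : Nat) : Bool := isRun_A ((q.drop j).take L)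

def specOut (L : Nat) (q : List Int) : List Int :=
  ((List.range (q.length + 1 - L)).filter (winP L q)).map (fun j => Int.ofNat j)

-- backward consecutive differences of q: e_i = q[i+1] - q[i]
def bdiffs (q : List Int) : List Int := List.zipWith (fun x y => x - y) q.tail q

-- proof-side mirror of isRun_A's body
def allEqGood : List Int → Bool
  | [] => false
  | δ :: ds => if δ = -1 ∨ δ = 1 then ds.all (fun d => d == δ) else false

def runLenEq (d : Int) : List Int → Nat
  | [] => 0
  | e :: es => if e = d then runLenEq d es + 1 else 0

-- length of the maximal good constant prefix (streak over the reversed diff list)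
def streakSpec : List Int → Nat
  | [] => 0
  | d :: rs => if d = -1 ∨ d = 1 then runLenEq d rs + 1 else 0

theorem isRun_A_eq_allEqGood (w : List Int) :
    isRun_A w = allEqGood (List.zipWith (fun x y => x - y) w w.tail) := by
  cases h : List.zipWith (fun x y => x - y) w w.tail <;> simp [isRun_A, allEqGood, h]

theorem allEqGood_iff (l : List Int) :
    allEqGood l = true ↔ ∃ d, (d = -1 ∨ d = 1) ∧ l ≠ [] ∧ ∀ a ∈ l, a = d := by
  cases l with
  | nil => simp [allEqGood]
  | cons δ ds =>
    simp only [allEqGood]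
    constructor
    · intro h
      split at h
      · refine ⟨δ, by assumption, by simp, ?_⟩
        intro a ha
        rcases List.mem_cons.1 ha with rfl | ha
        · rfl
        · simpa using (List.all_eq_true.1 h a ha)
      · simp at h
    · rintro ⟨d, hd, -, hall⟩
      have hδ : δ = d := hall δ (by simp)
      subst hδ
      rw [if_pos hd]
      exact List.all_eq_true.2 fun a ha => by simpa using hall a (List.mem_cons_of_mem _ ha)

theorem zip_sub_comm : ∀ (a b : List Int),
    List.zipWith (fun x y => x - y) a b =
      (List.zipWith (fun x y => x - y) b a).map (fun z => -z) := by
  intro a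
  induction a with
  | nil => intro b; cases b <;> simp
  | cons x t ih =>
    intro b
    cases b with
    | nil => simp
    | cons y u => simp [ih u]

theorem bdiffs_length (q : List Int) : (bdiffs q).length = q.length - 1 := by
  simp [bdiffs]

theorem bdiffs_cons2 (a b : Int) (t : List Int) :
    bdiffs (a :: b :: t) = (b - a) :: bdiffs (b :: t) := rfl

theorem bdiffs_drop : ∀ (q : List Int) (k : Nat), bdiffs (q.drop k) = (bdiffs q).drop k := by
  intro q
  induction q with
  | nil => intro k; simp [bdiffs]
  | cons a t ih =>
    intro k
    cases k with
    | zero => simp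
    | succ k =>
      cases t with
      | nil => simp [bdiffs]
      | cons b t' =>
        have : (a :: b :: t').drop (k + 1) = (b :: t').drop k := rfl
        rw [this, bdiffs_cons2, ih k]
        rfl

theorem bdiffs_append2 : ∀ (q : List Int) (y x : Int),
    bdiffs (q ++ [y, x]) = bdiffs (q ++ [y]) ++ [x - y] := by
  intro q
  induction q with
  | nil => intro y x; rfl
  | cons a q ih =>
    intro y x
    cases q with
    | nil => rfl
    | cons b q' =>
      have h1 : (a :: b :: q') ++ [y, x] = a :: b :: (q' ++ [y, x]) := by simp
      have h2 : (a :: b :: q') ++ [y] = a :: b :: (q' ++ [y]) := by simp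
      rw [h1, h2, bdiffs_cons2, bdiffs_cons2]
      have h3 : b :: (q' ++ [y, x]) = (b :: q') ++ [y, x] := by simp
      have h4 : b :: (q' ++ [y]) = (b :: q') ++ [y] := by simp
      rw [h3, h4, ih]
      simp

theorem runLenEq_ge : ∀ (rs : List Int) (d : Int) (k : Nat),
    k ≤ runLenEq d rs ↔ k ≤ rs.length ∧ ∀ a ∈ rs.take k, a = d := by
  intro rs
  induction rs with
  | nil => intro d k; simp [runLenEq]
  | cons e es ih =>
    intro d k
    cases k with
    | zero => simp
    | succ k =>
      by_cases he : e = d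
      · subst he
        have hru : runLenEq e (e :: es) = runLenEq e es + 1 := by simp [runLenEq]
        rw [hru, List.take_succ_cons, List.length_cons]
        rw [Nat.succ_le_succ_iff, ih e k]
        constructor
        · rintro ⟨h1, h2⟩
          exact ⟨by omega, by intro a ha; rcases List.mem_cons.1 ha with rfl | ha; rfl; exact h2 a ha⟩
        · rintro ⟨h1, h2⟩
          exact ⟨by omega, fun a ha => h2 a (List.mem_cons_of_mem _ ha)⟩
      · simp only [runLenEq, if_neg he, List.take_succ_cons]
        constructor
        · omega
        · rintro ⟨-, h2⟩; exact absurd (h2 e (by simp)) he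

theorem streakSpec_le_length : ∀ (r : List Int), streakSpec r ≤ r.length := by
  intro r
  cases r with
  | nil => simp [streakSpec]
  | cons d rs =>
    simp only [streakSpec, List.length_cons]
    split
    · have : runLenEq d rs ≤ rs.length := by
        have := (runLenEq_ge rs d (runLenEq d rs)).1 le_rfl
        exact this.1
      omega
    · omega

theorem streakSpec_ge_iff (r : List Int) (t : Nat) (ht : 1 ≤ t) :
    t ≤ streakSpec r ↔ t ≤ r.length ∧ allEqGood (r.take t) = true := by
  cases r with
  | nil => simp [streakSpec]; omega
  | cons δ rs =>
    simp only [streakSpec, List.length_cons]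
    obtain ⟨t', rfl⟩ : ∃ t', t = t' + 1 := ⟨t - 1, by omega⟩
    rw [List.take_succ_cons]
    by_cases hδ : δ = -1 ∨ δ = 1
    · rw [if_pos hδ]
      rw [allEqGood_iff]
      rw [Nat.succ_le_succ_iff, Nat.succ_le_succ_iff, runLenEq_ge]
      constructor
      · rintro ⟨h1, h2⟩
        refine ⟨h1, δ, hδ, by simp, ?_⟩
        intro a ha
        rcases List.mem_cons.1 ha with rfl | ha
        · rfl
        · exact h2 a ha
      · rintro ⟨h1, d, hd, -, hall⟩
        have hδd : δ = d := hall δ (by simp)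
        subst hδd
        exact ⟨h1, fun a ha => hall a (List.mem_cons_of_mem _ ha)⟩
    · rw [if_neg hδ]
      constructor
      · omega
      · rintro ⟨-, h⟩
        rcases (allEqGood_iff _).1 h with ⟨d, hd, -, hall⟩
        exact absurd (hall δ (by simp) ▸ hd) hδ

-- the streak update in stepB computes streakSpec of the extended reversed diff list
theorem streak_update (d : Int) (r : List Int) :
    (if (d = -1 ∨ d = 1) ∧ ((streakSpec r : Int) = 0 ∨ r.head? = some d) then (streakSpec r : Int) + 1
     else if d = -1 ∨ d = 1 then 1 else 0) = ((streakSpec (d :: r) : Nat) : Int) := by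
  by_cases hd : d = -1 ∨ d = 1
  · have hs : streakSpec (d :: r) = runLenEq d r + 1 := by simp [streakSpec, if_pos hd]
    cases r with
    | nil =>
      simp [streakSpec, runLenEq, hd]
    | cons e rs =>
      by_cases hed : e = d
      · subst hed
        have h1 : streakSpec (e :: rs) = runLenEq e rs + 1 := by simp [streakSpec, if_pos hd]
        rw [if_pos ⟨hd, Or.inr (by simp)⟩, hs, h1]
        simp [runLenEq]
      · have hr : runLenEq d (e :: rs) = 0 := by simp [runLenEq, hed]
        rw [hs, hr]
        by_cases h0 : (streakSpec (e :: rs) : Int) = 0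
        · rw [if_pos ⟨hd, Or.inl h0⟩, h0]; simp
        · rw [if_neg, if_pos hd]
          · simp
          · rintro ⟨-, h | h⟩
            · exact h0 h
            · simp at h; exact hed h
  · rw [if_neg (fun h => hd h.1), if_neg hd]
    simp [streakSpec, hd]

-- window at the end of p ++ [x] is a run  ↔  the streak is at least L - 1
theorem window_iff_streak (L : Nat) (hL : 2 ≤ L) (q : List Int) (hq : L ≤ q.length) :
    (winP L q (q.length - L) = true) ↔ L - 1 ≤ streakSpec ((bdiffs q).reverse) := by
  set k := q.length - L with hk
  have hwlen : ((q.drop k).take L) = q.drop k := by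
    apply List.take_of_length_le
    simp; omega
  have hbd : bdiffs (q.drop k) = (bdiffs q).drop k := bdiffs_drop q k
  have hlen : (bdiffs q).length = q.length - 1 := bdiffs_length q
  have hrev : ((bdiffs q).reverse.take (L - 1)) = ((bdiffs q).drop k).reverse := by
    rw [List.reverse_drop]
    congr 1
    omega
  rw [winP, hwlen]
  rw [isRun_A_eq_allEqGood]
  have hzip : List.zipWith (fun x y => x - y) (q.drop k) (q.drop k).tail =
      (bdiffs (q.drop k)).map (fun z => -z) := by
    rw [bdiffs, zip_sub_comm]
  rw [hzip, hbd]
  rw [streakSpec_ge_iff _ _ (by omega), hrev]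
  have hlen2 : L - 1 ≤ (bdiffs q).reverse.length := by simp [hlen]; omega
  simp only [hlen2, true_and]
  rw [allEqGood_iff, allEqGood_iff]
  constructor
  · rintro ⟨d, hd, hne, hall⟩
    refine ⟨-d, by omega, by simpa using hne, ?_⟩
    intro a ha
    rw [List.mem_reverse] at ha
    have : -a ∈ ((bdiffs q).drop k).map (fun z => -z) := List.mem_map_of_mem ha
    have := hall _ this
    omega
  · rintro ⟨d, hd, hne, hall⟩
    refine ⟨-d, by omega, by simpa using hne, ?_⟩
    intro a ha
    rcases List.mem_map.1 ha with ⟨b, hb, rfl⟩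
    have := hall b (List.mem_reverse.2 hb)
    omega

-- appending one element extends specOut by at most the single new window index
theorem specOut_snoc (L : Nat) (hL : 2 ≤ L) (p : List Int) (x : Int) :
    specOut L (p ++ [x]) =
      specOut L p ++
        (if L - 1 ≤ streakSpec ((bdiffs (p ++ [x])).reverse) then
            [(p.length : Int) - ((L : Int) - 1)]
          else []) := by
  by_cases hcase : L ≤ p.length + 1
  · have hlen : (p ++ [x]).length = p.length + 1 := by simp
    have hr1 : p.length + 1 + 1 - L = (p.length + 1 - L) + 1 := by omega
    have hfilter :
        (List.range (p.length + 1 - L)).filter (winP L (p ++ [x])) =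
          (List.range (p.length + 1 - L)).filter (winP L p) := by
      apply List.filter_congr
      intro j hj
      rw [List.mem_range] at hj
      unfold winP
      rw [List.drop_append_of_le_length (by omega),
        List.take_append_of_le_length (by simp; omega)]
    have hwin : winP L (p ++ [x]) (p.length + 1 - L) =
        decide (L - 1 ≤ streakSpec ((bdiffs (p ++ [x])).reverse)) := by
      have hiff := window_iff_streak L hL (p ++ [x]) (by simp; omega)
      rw [hlen] at hiff
      by_cases hb : L - 1 ≤ streakSpec ((bdiffs (p ++ [x])).reverse)
      · simp [hb, hiff.2 hb]
      · simp only [decide_eq_false hb]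
        by_contra hc
        simp only [Bool.not_eq_false] at hc
        exact hb (hiff.1 hc)
    unfold specOut
    rw [hlen, hr1, List.range_succ, List.filter_append, List.map_append, hfilter]
    congr 1
    simp only [List.filter_cons, List.filter_nil, hwin]
    by_cases hb : L - 1 ≤ streakSpec ((bdiffs (p ++ [x])).reverse)
    · simp only [hb, decide_true, if_true, if_pos, List.map_cons, List.map_nil]
      congr 1
      simp only [Int.ofNat_eq_natCast]
      push_cast
      omega
    · simp [hb]
  · -- too short for any window: everything is empty
    have h3 : streakSpec ((bdiffs (p ++ [x])).reverse) < L - 1 := by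
      have hle := streakSpec_le_length ((bdiffs (p ++ [x])).reverse)
      have hl : ((bdiffs (p ++ [x])).reverse).length = p.length := by
        simp [bdiffs_length]
      omega
    unfold specOut
    rw [if_neg (by omega)]
    have e1 : (p ++ [x]).length + 1 - L = 0 := by simp; omega
    have e2 : p.length + 1 - L = 0 := by omega
    rw [e1, e2]
    simp

-- the tail of A's loop state is just drop 1
theorem take_drop_append (L : Nat) (hL : 1 ≤ L) (s : List Int) (h : L ≤ s.length) :
    (s.take L).drop 1 ++ s.drop L = s.drop 1 := by
  rw [List.drop_take]
  have h2 : s.drop L = (s.drop 1).drop (L - 1) := by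
    rw [List.drop_drop]
    congr 1
    omega
  rw [h2, List.take_append_drop]

theorem winP_succ (L : Nat) (s : List Int) (j : Nat) :
    winP L s (j + 1) = winP L (s.drop 1) j := by
  unfold winP
  have h : (s.drop 1).drop j = s.drop (j + 1) := by
    rw [List.drop_drop, Nat.add_comm]
  rw [h]

-- A's loop computes the spec (shifted by the running index)
theorem goA_eq (L : Nat) (hL : 1 ≤ L) : ∀ (n : Nat) (s : List Int), s.length ≤ n → ∀ (i : Int),
    goA L hL s i =
      ((List.range (s.length + 1 - L)).filter (winP L s)).map (fun j => i + Int.ofNat j) := by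
  intro n
  induction n with
  | zero =>
    intro s hs i
    have hnil : s = [] := List.length_eq_zero_iff.1 (by omega)
    subst hnil
    rw [goA]
    simp only [List.take_nil, List.length_nil]
    rw [dif_pos (by omega)]
    have h0 : 0 + 1 - L = 0 := by omega
    simp [h0]
  | succ n ih =>
    intro s hs i
    rw [goA]
    by_cases h : (s.take L).length < L
    · rw [dif_pos h]
      simp only [List.length_take] at h
      have h0 : s.length + 1 - L = 0 := by omega
      simp [h0]
    · rw [dif_neg h]
      simp only [List.length_take] at h
      have hLs : L ≤ s.length := by omega
      rw [take_drop_append L hL s hLs]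
      rw [ih (s.drop 1) (by simp; omega) (i + 1)]
      have hr : s.length + 1 - L = (s.length - L) + 1 := by omega
      have hr2 : (s.drop 1).length + 1 - L = s.length - L := by simp; omega
      rw [hr, hr2, List.range_succ_eq_map, List.filter_cons, List.filter_map]
      have hcomp : (winP L s ∘ Nat.succ) = winP L (s.drop 1) := by
        funext j
        simp only [Function.comp]
        exact winP_succ L s j
      rw [hcomp]
      have hw : isRun_A (s.take L) = winP L s 0 := by
        simp [winP]
      have hmm : ∀ (l : List Nat),
          (l.map Nat.succ).map (fun j => i + Int.ofNat j) =
            l.map (fun j => (i + 1) + Int.ofNat j) := by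
        intro l
        rw [List.map_map]
        apply List.map_congr_left
        intro a _
        simp only [Function.comp, Int.ofNat_eq_natCast]
        push_cast
        ring
      rw [hw]
      by_cases hrun : winP L s 0 = true
      · simp only [hrun, decide_true, if_pos, List.map_cons]
        rw [hmm]
        congr 1
        simp
      · simp only [hrun, Bool.false_eq_true, decide_false, if_false, List.nil_append]
        rw [hmm]

-- evaluation of specOut on lists too short to hold a window
theorem specOut_short (L : Nat) (q : List Int) (h : q.length + 1 - L = 0) :
    specOut L q = [] := by
  unfold specOut
  rw [h]
  simp

-- one unfolded step of B when a previous element exists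
theorem stepB_some (RL : Int) (prev : Int) (pd : Option Int) (st i : Int) (out : List Int) (x : Int) :
    stepB RL (some prev, pd, st, i, out) x =
      (some x, some (x - prev),
        (if (x - prev = -1 ∨ x - prev = 1) ∧ (st = 0 ∨ pd = some (x - prev)) then st + 1
         else if x - prev = -1 ∨ x - prev = 1 then 1 else 0),
        i + 1,
        (if RL - 1 ≤
            (if (x - prev = -1 ∨ x - prev = 1) ∧ (st = 0 ∨ pd = some (x - prev)) then st + 1
             else if x - prev = -1 ∨ x - prev = 1 then 1 else 0)
          then out ++ [i - (RL - 1)] else out)) := rfl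

-- B's fold invariant: after consuming p the state is fully characterised
theorem foldB_inv (RL : Int) (L : Nat) (hL : 2 ≤ L) (hc : (L : Int) = RL) (p : List Int) :
    p.foldl (stepB RL) (none, none, 0, 0, []) =
      (p.getLast?, (bdiffs p).reverse.head?, ((streakSpec ((bdiffs p).reverse) : Nat) : Int),
        (p.length : Int), specOut L p) := by
  induction p using List.reverseRecOn with
  | nil =>
    simp only [List.foldl_nil]
    rw [specOut_short L [] (by simp; omega)]
    rfl
  | append_singleton p x ih =>
    rw [List.foldl_append, ih]
    rcases List.eq_nil_or_concat' p with rfl | ⟨q, y, rfl⟩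
    · -- first element: prev is None
      simp only [List.nil_append]
      rw [specOut_short L [] (by simp; omega), specOut_short L [x] (by simp; omega)]
      rfl
    · have hlast : (q ++ [y]).getLast? = some y := by simp
      have hbd : bdiffs (q ++ [y] ++ [x]) = bdiffs (q ++ [y]) ++ [x - y] := by
        rw [List.append_assoc]
        exact bdiffs_append2 q y x
      have hrev : (bdiffs (q ++ [y] ++ [x])).reverse = (x - y) :: (bdiffs (q ++ [y])).reverse := by
        rw [hbd]; simp
      rw [hlast]
      simp only [List.foldl_cons, List.foldl_nil]
      rw [stepB_some, hrev]
      have hstreak := streak_update (x - y) ((bdiffs (q ++ [y])).reverse)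
      rw [hstreak]
      rw [specOut_snoc L hL (q ++ [y]) x, hrev]
      have hout : (if RL - 1 ≤ ((streakSpec ((x - y) :: (bdiffs (q ++ [y])).reverse) : Nat) : Int)
            then specOut L (q ++ [y]) ++ [((q ++ [y]).length : Int) - (RL - 1)]
            else specOut L (q ++ [y])) =
          specOut L (q ++ [y]) ++
            (if L - 1 ≤ streakSpec ((x - y) :: (bdiffs (q ++ [y])).reverse) then
                [((q ++ [y]).length : Int) - ((L : Int) - 1)] else []) := by
        by_cases hb : L - 1 ≤ streakSpec ((x - y) :: (bdiffs (q ++ [y])).reverse)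
        · rw [if_pos hb, if_pos (by omega)]
          rw [show RL - 1 = (L : Int) - 1 by omega]
        · rw [if_neg hb, if_neg (by omega)]
          simp
      rw [hout]
      simp [List.getLast?_append]
      omega

-- both ports equal the spec
theorem A_eq_spec (s : List Int) (RL : Int) (h : 2 ≤ RL) :
    findNumberRuns s RL = specOut RL.toNat s := by
  unfold findNumberRuns
  rw [dif_neg (by omega)]
  rw [goA_eq RL.toNat (by omega) s.length s le_rfl 0]
  unfold specOut
  apply List.map_congr_left
  intro a _
  simp

theorem B_eq_spec (s : List Int) (RL : Int) (h : 2 ≤ RL) :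
    findNumberRuns_alt s RL = specOut RL.toNat s := by
  unfold findNumberRuns_alt
  rw [if_neg (by omega)]
  rw [foldB_inv RL RL.toNat (by omega) (by omega) s]

-- ===== VERDICT (by name: the statement is the Claim_ definition above) =====
theorem findNumberRuns_spec : Claim_equal_findNumberRuns := by
  intro s RL _ hpre
  unfold Spec_findNumberRuns
  rw [A_eq_spec s RL hpre, B_eq_spec s RL hpre]
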